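-- pv_equiv track=rewrite | github.com/iashevyakov/algos-sql-training | algos-ya-training-8/tree & binary search/gravity.py | get_particle_gravity
-- ===== SOURCE A (Python) =====
-- from bisect import bisect_right
--
-- def get_particle_gravity(n: int, a: list[int], m: int, b: list[int]) -> int:
--     a_sorted, b_sorted = sorted(a), sorted(b)
--     prefix_sum_a = [0] * (n + 1)
--     prefix_sum_b = [0] * (m + 1)
--     for i in range(n):
--         prefix_sum_a[i + 1] = prefix_sum_a[i] + a_sorted[i]
--     for i in range(m):
--         prefix_sum_b[i + 1] = prefix_sum_b[i] + b_sorted[i]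
--
--     answer = 0
--
--     for i in range(n):
--         pos = bisect_right(b_sorted, a[i])
--         sum_1 = a[i] * pos - prefix_sum_b[pos]
--         sum_2 = prefix_sum_b[m] - prefix_sum_b[pos] - a[i] * (m - pos)
--         answer += i * (sum_1 + sum_2)
--
--     for j in range(m):
--         pos = bisect_right(a_sorted, b[j])
--         sum_1 = b[j] * pos - prefix_sum_a[pos]
--         sum_2 = prefix_sum_a[n] - prefix_sum_a[pos] - b[j] * (n - pos)
--         answer -= j * (sum_1 + sum_2)
--
--     return answer
-- ===== SOURCE B (Python) =====
-- def get_particle_gravity(n: int, a: list[int], m: int, b: list[int]) -> int: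
--     xs = [a[i] for i in range(n)]
--     ys = [b[j] for j in range(m)]
--     answer = 0
--     for i in range(n):
--         for j in range(m):
--             answer += (i - j) * abs(xs[i] - ys[j])
--     return answer
-- ===== Notes on version B (the rewrite author's own statement) =====
-- stated objective: simpler
-- what changed: Replaces the sorting + prefix-sum + bisect machinery with the direct all-pairs double loop accumulating (i - j) * abs(a[i] - b[j]).
-- outside the precondition, e.g. on get_particle_gravity(1, [5, 1], 2, [0, 0]): A returns -1, B returns -5
import Mathlib
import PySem

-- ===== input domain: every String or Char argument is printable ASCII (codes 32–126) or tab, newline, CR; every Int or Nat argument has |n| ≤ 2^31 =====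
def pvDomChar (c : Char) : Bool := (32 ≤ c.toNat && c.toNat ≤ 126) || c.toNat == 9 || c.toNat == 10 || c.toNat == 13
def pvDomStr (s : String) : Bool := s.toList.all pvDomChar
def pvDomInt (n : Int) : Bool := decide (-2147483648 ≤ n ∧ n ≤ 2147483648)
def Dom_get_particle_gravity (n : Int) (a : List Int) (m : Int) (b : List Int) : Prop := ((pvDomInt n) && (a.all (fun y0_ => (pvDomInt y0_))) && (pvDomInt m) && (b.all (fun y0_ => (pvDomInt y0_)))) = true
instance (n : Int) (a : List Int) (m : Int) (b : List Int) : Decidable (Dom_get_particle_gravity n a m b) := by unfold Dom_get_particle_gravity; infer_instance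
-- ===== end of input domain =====

-- B replaces A's sorting + prefix-sum + bisect machinery with the direct all-pairs
-- double loop accumulating (i - j) * abs(a[i] - b[j]) — simpler, not faster.

-- ===== PORT A =====
-- loop body of A's two weighted loops: pos = bisect_right(srt, x); sum_1 + sum_2
def pvBodyA (srt : List Int) (pref : List Int) (len : Int) (x : Int) : Int :=
  let pos : Int := (PySem.List.bisectRight srt x : Int)
  let sum1 := x * pos - PySem.List.pyGetD pref pos 0
  let sum2 := PySem.List.pyGetD pref len 0 - PySem.List.pyGetD pref pos 0 - x * (len - pos)
  sum1 + sum2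

def get_particle_gravity (n : Int) (a : List Int) (m : Int) (b : List Int) : Int :=
  let aS := PySem.List.sorted a (fun y => y) false
  let bS := PySem.List.sorted b (fun y => y) false
  -- the two prefix-sum-building loops: prefix_sum[i+1] = prefix_sum[i] + sorted[i]
  let pa := List.scanl (· + ·) 0 aS
  let pb := List.scanl (· + ·) 0 bS
  let ans1 := (PySem.List.pyRange 0 n 1).foldl
    (fun answer i => answer + i * pvBodyA bS pb m (PySem.List.pyGetD a i 0)) 0
  (PySem.List.pyRange 0 m 1).foldl
    (fun answer j => answer - j * pvBodyA aS pa n (PySem.List.pyGetD b j 0)) ans1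

-- ===== PORT B =====
def get_particle_gravity_alt (n : Int) (a : List Int) (m : Int) (b : List Int) : Int :=
  let xs := (PySem.List.pyRange 0 n 1).map (fun i => PySem.List.pyGetD a i 0)
  let ys := (PySem.List.pyRange 0 m 1).map (fun j => PySem.List.pyGetD b j 0)
  (PySem.List.pyRange 0 n 1).foldl (fun answer i =>
    (PySem.List.pyRange 0 m 1).foldl (fun answer j =>
      answer + (i - j) * |PySem.List.pyGetD xs i 0 - PySem.List.pyGetD ys j 0|) answer) 0

-- ===== PRECONDITION & SPEC =====
-- Pre_ is A's no-raise domain (the size bounds and the prefix-array count bounds,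
-- outside which A raises IndexError, or nonpositive n and m, where both loops are
-- empty), minus one defensible corner of malformed input: when the declared counts
-- are inconsistent with the lengths such that a[:n] (resp. b[:m]) is not a set of
-- smallest elements of its list and a nonzero weight reaches it (m >= 2 resp.
-- n >= 2), A measures distances to the n (resp. m) smallest elements while B uses
-- the declared prefixes a[:n], b[:m] — both arbitrary readings of inconsistent
-- counts, so such inputs are excluded.
def Pre_get_particle_gravity (n : Int) (a : List Int) (m : Int) (b : List Int) : Prop :=
  (0 ≤ n ∧ n ≤ (a.length : Int) ∧ 0 ≤ m ∧ m ≤ (b.length : Int)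
   ∧ (∀ x ∈ a.take n.toNat, b.countP (fun y => decide (y ≤ x)) ≤ m.toNat)
   ∧ (∀ x ∈ b.take m.toNat, a.countP (fun y => decide (y ≤ x)) ≤ n.toNat)
   ∧ (2 ≤ m → ∀ x ∈ a.take n.toNat, ∀ y ∈ a.drop n.toNat, x ≤ y)
   ∧ (2 ≤ n → ∀ x ∈ b.take m.toNat, ∀ y ∈ b.drop m.toNat, x ≤ y))
  ∨ (n ≤ 0 ∧ m ≤ 0)
instance (n : Int) (a : List Int) (m : Int) (b : List Int) : Decidable (Pre_get_particle_gravity n a m b) := by unfold Pre_get_particle_gravity; infer_instance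

def pvWitness_get_particle_gravity : Int × List Int × Int × List Int := (2, [3, 1], 1, [2])

def Spec_get_particle_gravity (n : Int) (a : List Int) (m : Int) (b : List Int) (out : Int) : Prop := out = get_particle_gravity_alt n a m b
instance (n : Int) (a : List Int) (m : Int) (b : List Int) (out : Int) : Decidable (Spec_get_particle_gravity n a m b out) := by unfold Spec_get_particle_gravity; infer_instance

-- ===== CLAIM (what is proved, stated in full; the proofs are below) =====
def Claim_equal_get_particle_gravity : Prop := ∀ (n : Int) (a : List Int) (m : Int) (b : List Int), Dom_get_particle_gravity n a m b → Pre_get_particle_gravity n a m b → Spec_get_particle_gravity n a m b (get_particle_gravity n a m b)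

-- ===== LEMMAS AND PROOFS =====

lemma pv_sum_abs_of_le (x : Int) : ∀ (ls : List Int), (∀ y ∈ ls, y ≤ x) →
    (ls.map (fun y => |x - y|)).sum = x * ls.length - ls.sum := by
  intro ls h
  induction ls with
  | nil => simp
  | cons z ls ih =>
    have hz : z ≤ x := h z (List.mem_cons_self)
    have := ih (fun y hy => h y (List.mem_cons_of_mem _ hy))
    simp only [List.map_cons, List.sum_cons, this, List.length_cons]
    rw [abs_of_nonneg (by omega)]
    push_cast; ring

lemma pv_sum_abs_of_gt (x : Int) : ∀ (ls : List Int), (∀ y ∈ ls, x < y) →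
    (ls.map (fun y => |x - y|)).sum = ls.sum - x * ls.length := by
  intro ls h
  induction ls with
  | nil => simp
  | cons z ls ih =>
    have hz : x < z := h z (List.mem_cons_self)
    have := ih (fun y hy => h y (List.mem_cons_of_mem _ hy))
    simp only [List.map_cons, List.sum_cons, this, List.length_cons]
    rw [abs_of_nonpos (by omega)]
    push_cast; ring

lemma pv_scanl_getD : ∀ (ls : List Int) (c : Int) (k : Nat), k ≤ ls.length →
    (List.scanl (· + ·) c ls).getD k 0 = c + (ls.take k).sum := by
  intro ls
  induction ls with
  | nil =>
    intro c k hk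
    have : k = 0 := by simpa using hk
    subst this; simp [List.scanl]
  | cons z ls ih =>
    intro c k hk
    cases k with
    | zero => simp [List.scanl_cons]
    | succ k =>
      rw [List.scanl_cons, List.getD_cons_succ, List.take_succ_cons, List.sum_cons]
      rw [ih (c + z) k (by simpa using hk)]
      ring

-- the per-element identity: on the sorted list, A's sum_1 + sum_2 with prefix length M
-- is the total |x - y| distance to the M smallest elements
lemma pvBodyA_eq (ys : List Int) (M : Nat) (x : Int) (hM : M ≤ ys.length)
    (hcnt : ys.countP (fun y => decide (y ≤ x)) ≤ M) :
    pvBodyA (PySem.List.sorted ys (fun y => y) false)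
            (List.scanl (· + ·) 0 (PySem.List.sorted ys (fun y => y) false))
            ((M : Nat) : Int) x
      = (((PySem.List.sorted ys (fun y => y) false).take M).map (fun y => |x - y|)).sum := by
  set zs := PySem.List.sorted ys (fun y => y) false with hzs
  have hperm : zs.Perm ys := PySem.List.sorted_perm ys _ false
  have hpair : zs.Pairwise (fun p q => p ≤ q) := PySem.List.sorted_pairwise ys (fun y => y)
  obtain ⟨hk, hbelow, habove⟩ := PySem.List.bisectRight_spec zs x hpair
  set k := PySem.List.bisectRight zs x with hkdef
  have hlen : zs.length = ys.length := hperm.length_eq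
  have htake : ∀ y ∈ zs.take k, y ≤ x := by
    intro y hy
    obtain ⟨j, hj, hjy⟩ := List.mem_iff_getElem.mp hy
    have hjk : j < k := lt_of_lt_of_le hj (by simp [List.length_take])
    have hjl : j < zs.length := lt_of_lt_of_le hjk hk
    rw [List.getElem_take] at hjy
    exact hjy ▸ hbelow j hjl hjk
  have hdrop : ∀ y ∈ zs.drop k, x < y := by
    intro y hy
    obtain ⟨j, hj, hjy⟩ := List.mem_iff_getElem.mp hy
    rw [List.getElem_drop] at hjy
    have hjl : k + j < zs.length := by
      have := hj; simp [List.length_drop] at this; omega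
    exact hjy ▸ habove (k + j) hjl (Nat.le_add_right _ _)
  -- bisect_right on the sorted list counts the elements ≤ x
  have hkcount : k = zs.countP (fun y => decide (y ≤ x)) := by
    conv_rhs => rw [← List.take_append_drop k zs]
    rw [List.countP_append]
    rw [List.countP_eq_length.mpr (fun y hy => by simpa using htake y hy)]
    rw [List.countP_eq_zero.mpr (fun y hy => by simpa using not_le.mpr (hdrop y hy))]
    simp [List.length_take, Nat.min_eq_left hk]
  have hkM : k ≤ M := by
    rw [hkcount, hperm.countP_eq]; exact hcnt
  have hMz : M ≤ zs.length := by omega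
  unfold pvBodyA
  simp only [← hkdef]
  have h1 : PySem.List.pyGetD (List.scanl (· + ·) 0 zs) ((k : Nat) : Int) 0
      = 0 + (zs.take k).sum := by
    rw [PySem.List.pyGetD_natCast]
    exact pv_scanl_getD zs 0 k hk
  have h2 : PySem.List.pyGetD (List.scanl (· + ·) 0 zs) ((M : Nat) : Int) 0
      = 0 + (zs.take M).sum := by
    rw [PySem.List.pyGetD_natCast]
    exact pv_scanl_getD zs 0 M hMz
  rw [h1, h2]
  have hsplit : zs.take M = zs.take k ++ (zs.take M).drop k := by
    conv_lhs => rw [← List.take_append_drop k (zs.take M)]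
    rw [List.take_take, Nat.min_eq_left hkM]
  have hdropM : ∀ y ∈ (zs.take M).drop k, x < y := by
    intro y hy
    apply hdrop
    rw [List.drop_take] at hy
    exact List.mem_of_mem_take hy
  conv_rhs => rw [hsplit, List.map_append, List.sum_append]
  rw [pv_sum_abs_of_le x _ htake, pv_sum_abs_of_gt x _ hdropM]
  have hlt : ((zs.take k).length : Int) = (k : Int) := by
    simp [List.length_take, Nat.min_eq_left hk]
  have hld : (((zs.take M).drop k).length : Int) = (M : Int) - (k : Int) := by
    simp only [List.length_drop, List.length_take]
    omega
  have hst : (zs.take M).sum = (zs.take k).sum + ((zs.take M).drop k).sum := by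
    conv_lhs => rw [hsplit]
    rw [List.sum_append]
  rw [hlt, hld, hst]
  ring

-- list-range sum is the Finset.range sum (definitional)
lemma pv_listsum (N : Nat) (f : Nat → Int) :
    ((List.range N).map f).sum = ∑ i ∈ Finset.range N, f i := rfl

-- sum of f over the first M elements of ys, written by index
lemma pv_sum_getD (ys : List Int) (M : Nat) (hM : M ≤ ys.length) (f : Int → Int) :
    ∑ j ∈ Finset.range M, f (ys.getD j 0) = ((ys.take M).map f).sum := by
  rw [← pv_listsum]
  have : (List.range M).map (fun j => f (ys.getD j 0)) = (ys.take M).map f := by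
    apply List.ext_getElem (by simp [List.length_take]; omega)
    intro i h1 h2
    have h3 : i < M := by simpa using h1
    have h4 : i < ys.length := by omega
    simp [List.getD_eq_getElem?_getD, List.getElem_take, h4]
  rw [this]

-- the declared prefix is exactly (a permutation of) the sorted list's prefix
lemma pv_sorted_take (xs : List Int) (N : Nat) (hN : N ≤ xs.length)
    (hb : ∀ x ∈ xs.take N, ∀ y ∈ xs.drop N, x ≤ y) :
    ((PySem.List.sorted xs (fun y => y) false).take N).Perm (xs.take N) := by
  set P := xs.take N with hP
  set S := xs.drop N with hS
  have hcand : PySem.List.sorted xs (fun y => y) false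
      = PySem.List.sorted P (fun y => y) false ++ PySem.List.sorted S (fun y => y) false := by
    apply PySem.List.eq_of_perm_of_pairwise_le_of_injective (fun y => y) (fun _ _ h => h)
    · exact (PySem.List.sorted_perm xs _ false).trans
        (((PySem.List.sorted_perm P _ false).append (PySem.List.sorted_perm S _ false)).trans
          (by rw [hP, hS, List.take_append_drop])).symm
    · exact PySem.List.sorted_pairwise xs (fun y => y)
    · rw [List.pairwise_append]
      refine ⟨PySem.List.sorted_pairwise P (fun y => y),
              PySem.List.sorted_pairwise S (fun y => y), ?_⟩
      intro x hx y hy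
      exact hb x ((PySem.List.mem_sorted _ _ _ _).mp hx) y ((PySem.List.mem_sorted _ _ _ _).mp hy)
  have hlenP : (PySem.List.sorted P (fun y => y) false).length = N := by
    rw [(PySem.List.sorted_perm P _ false).length_eq, hP, List.length_take,
        Nat.min_eq_left hN]
  rw [hcand]
  rw [show N = (PySem.List.sorted P (fun y => y) false).length from hlenP.symm,
      List.take_left]
  exact PySem.List.sorted_perm P _ false

-- a pyRange-(0..N) foldl-accumulated sum is a Finset.range sum
lemma pv_fold_range (N : Nat) (g : Int → Int) (c : Int) :
    (PySem.List.pyRange 0 (N : Int) 1).foldl (fun acc i => acc + g i) c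
      = c + ∑ i ∈ Finset.range N, g (i : Int) := by
  rw [PySem.List.foldl_add, PySem.List.pyRange_one]
  simp only [sub_zero, Int.toNat_natCast, List.map_map]
  rw [pv_listsum]
  simp [Function.comp]

lemma pv_portA_eq (N M : Nat) (a b : List Int) (hN : N ≤ a.length) (hM : M ≤ b.length)
    (hca : ∀ x ∈ a.take N, b.countP (fun y => decide (y ≤ x)) ≤ M)
    (hcb : ∀ x ∈ b.take M, a.countP (fun y => decide (y ≤ x)) ≤ N) :
    get_particle_gravity ((N : Nat) : Int) a ((M : Nat) : Int) b
      = (∑ i ∈ Finset.range N, (i : Int) *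
          (((PySem.List.sorted b (fun y => y) false).take M).map
            (fun y => |a.getD i 0 - y|)).sum)
        - (∑ j ∈ Finset.range M, (j : Int) *
            (((PySem.List.sorted a (fun y => y) false).take N).map
              (fun y => |b.getD j 0 - y|)).sum) := by
  have hmem : ∀ i : Nat, i < N → a.getD i 0 ∈ a.take N := by
    intro i hi
    have hi' : i < a.length := by omega
    have h1 : a.getD i 0 = a[i] := by
      simp [List.getD_eq_getElem?_getD, hi']
    rw [h1]
    exact List.mem_iff_getElem.mpr
      ⟨i, by simp [List.length_take]; omega, by rw [List.getElem_take]⟩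
  have hmemb : ∀ j : Nat, j < M → b.getD j 0 ∈ b.take M := by
    intro j hj
    have hj' : j < b.length := by omega
    have h1 : b.getD j 0 = b[j] := by
      simp [List.getD_eq_getElem?_getD, hj']
    rw [h1]
    exact List.mem_iff_getElem.mpr
      ⟨j, by simp [List.length_take]; omega, by rw [List.getElem_take]⟩
  unfold get_particle_gravity
  conv_lhs => simp only [sub_eq_add_neg]
  rw [pv_fold_range N
      (fun i => i * pvBodyA (PySem.List.sorted b (fun y => y) false)
        (List.scanl (· + ·) 0 (PySem.List.sorted b (fun y => y) false)) (((M : Nat) : Int))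
        (PySem.List.pyGetD a i 0)) 0]
  rw [pv_fold_range M
      (fun j => -(j * pvBodyA (PySem.List.sorted a (fun y => y) false)
        (List.scanl (· + ·) 0 (PySem.List.sorted a (fun y => y) false)) (((N : Nat) : Int))
        (PySem.List.pyGetD b j 0))) _]
  rw [Finset.sum_neg_distrib, zero_add, ← sub_eq_add_neg]
  congr 1
  · apply Finset.sum_congr rfl
    intro i hi
    have hi' : i < N := Finset.mem_range.mp hi
    rw [PySem.List.pyGetD_natCast]
    rw [pvBodyA_eq b M (a.getD i 0) hM (hca _ (hmem i hi'))]
  · apply Finset.sum_congr rfl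
    intro j hj
    have hj' : j < M := Finset.mem_range.mp hj
    rw [PySem.List.pyGetD_natCast]
    rw [pvBodyA_eq a N (b.getD j 0) hN (hcb _ (hmemb j hj'))]

lemma pv_portB_eq (N M : Nat) (a b : List Int) :
    get_particle_gravity_alt ((N : Nat) : Int) a ((M : Nat) : Int) b
      = ∑ i ∈ Finset.range N, ∑ j ∈ Finset.range M,
          ((i : Int) - (j : Int)) * |a.getD i 0 - b.getD j 0| := by
  simp only [get_particle_gravity_alt]
  set xsm := (PySem.List.pyRange 0 ((N : Nat) : Int) 1).map (fun i => PySem.List.pyGetD a i 0) with hxs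
  set ysm := (PySem.List.pyRange 0 ((M : Nat) : Int) 1).map (fun j => PySem.List.pyGetD b j 0) with hys
  have hinner : ∀ (x : Int) (acc : Int),
      (PySem.List.pyRange 0 ((M : Nat) : Int) 1).foldl
        (fun answer j => answer + (x - j) * |PySem.List.pyGetD xsm x 0 - PySem.List.pyGetD ysm j 0|) acc
      = acc + ∑ j ∈ Finset.range M,
          (x - (j : Int)) * |PySem.List.pyGetD xsm x 0 - PySem.List.pyGetD ysm ((j : Nat) : Int) 0| := by
    intro x acc
    exact pv_fold_range M
        (fun j => (x - j) * |PySem.List.pyGetD xsm x 0 - PySem.List.pyGetD ysm j 0|) acc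
  simp only [hinner]
  rw [pv_fold_range N
      (fun i => ∑ j ∈ Finset.range M,
        (i - (j : Int)) * |PySem.List.pyGetD xsm i 0 - PySem.List.pyGetD ysm ((j : Nat) : Int) 0|) 0]
  rw [zero_add]
  apply Finset.sum_congr rfl
  intro i hi
  apply Finset.sum_congr rfl
  intro j hj
  rw [hxs, hys,
      PySem.List.pyGetD_map_pyRange (fun i => PySem.List.pyGetD a i 0) N i 0 (Finset.mem_range.mp hi),
      PySem.List.pyGetD_map_pyRange (fun j => PySem.List.pyGetD b j 0) M j 0 (Finset.mem_range.mp hj)]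
  simp

-- the double sum splits into A's two weighted single sums
lemma pv_double_split (N M : Nat) (c : Nat → Nat → Int) :
    ∑ i ∈ Finset.range N, ∑ j ∈ Finset.range M, ((i : Int) - (j : Int)) * c i j
      = (∑ i ∈ Finset.range N, (i : Int) * ∑ j ∈ Finset.range M, c i j)
        - (∑ j ∈ Finset.range M, (j : Int) * ∑ i ∈ Finset.range N, c i j) := by
  have h : ∀ (i : Nat), ∑ j ∈ Finset.range M, ((i : Int) - (j : Int)) * c i j
      = ((i : Int) * ∑ j ∈ Finset.range M, c i j)
        - ∑ j ∈ Finset.range M, (j : Int) * c i j := by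
    intro i
    rw [Finset.mul_sum, ← Finset.sum_sub_distrib]
    exact Finset.sum_congr rfl (fun j _ => by ring)
  rw [Finset.sum_congr rfl (fun i _ => h i), Finset.sum_sub_distrib]
  congr 1
  rw [Finset.sum_comm]
  exact Finset.sum_congr rfl (fun j _ => by rw [Finset.mul_sum])

-- ===== VERDICT (by name: the statement is the Claim_ definition above) =====
theorem get_particle_gravity_spec : Claim_equal_get_particle_gravity := by
  intro n a m b _ hpre
  rcases hpre with hpre | ⟨hneg, hmeg⟩
  case inr =>
    -- both loop ranges are empty: A and B return 0
    unfold Spec_get_particle_gravity get_particle_gravity get_particle_gravity_alt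
    rw [PySem.List.pyRange_one_eq_nil hneg, PySem.List.pyRange_one_eq_nil hmeg]
    rfl
  obtain ⟨hn0, hnl, hm0, hml, hca, hcb, hnd1, hnd2⟩ := hpre
  unfold Spec_get_particle_gravity
  have hn : n = ((n.toNat : Nat) : Int) := (Int.toNat_of_nonneg hn0).symm
  have hm : m = ((m.toNat : Nat) : Int) := (Int.toNat_of_nonneg hm0).symm
  set N := n.toNat with hNdef
  set M := m.toNat with hMdef
  have hN : N ≤ a.length := by omega
  have hM : M ≤ b.length := by omega
  rw [hn, hm]
  rw [pv_portA_eq N M a b hN hM hca hcb, pv_portB_eq N M a b,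
      pv_double_split N M (fun i j => |a.getD i 0 - b.getD j 0|)]
  congr 1
  · -- first weighted sum: relevant only when n ≥ 2, where ¬D_ gives the b-boundary
    by_cases hn2 : N ≤ 1
    · rw [Finset.sum_eq_zero (fun i hi => by
          have : i = 0 := by have := Finset.mem_range.mp hi; omega
          simp [this]),
        Finset.sum_eq_zero (fun i hi => by
          have : i = 0 := by have := Finset.mem_range.mp hi; omega
          simp [this])]
    · have hbb : ∀ x ∈ b.take M, ∀ y ∈ b.drop M, x ≤ y := by
        intro x hx y hy
        exact hnd2 (by omega) x hx y hy
      apply Finset.sum_congr rfl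
      intro i _
      congr 1
      rw [pv_sum_getD b M hM (fun y => |a.getD i 0 - y|)]
      exact (((pv_sorted_take b M hM hbb).map (fun y => |a.getD i 0 - y|)).sum_eq)
  · -- second weighted sum: relevant only when m ≥ 2, where ¬D_ gives the a-boundary
    by_cases hm2 : M ≤ 1
    · rw [Finset.sum_eq_zero (fun j hj => by
          have : j = 0 := by have := Finset.mem_range.mp hj; omega
          simp [this]),
        Finset.sum_eq_zero (fun j hj => by
          have : j = 0 := by have := Finset.mem_range.mp hj; omega
          simp [this])]
    · have hba : ∀ x ∈ a.take N, ∀ y ∈ a.drop N, x ≤ y := by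
        intro x hx y hy
        exact hnd1 (by omega) x hx y hy
      apply Finset.sum_congr rfl
      intro j _
      congr 1
      rw [show (∑ i ∈ Finset.range N, |a.getD i 0 - b.getD j 0|)
          = ∑ i ∈ Finset.range N, |b.getD j 0 - a.getD i 0| from
        Finset.sum_congr rfl (fun i _ => abs_sub_comm _ _)]
      rw [pv_sum_getD a N hN (fun y => |b.getD j 0 - y|)]
      exact (((pv_sorted_take a N hN hba).map (fun y => |b.getD j 0 - y|)).sum_eq)
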